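-- pv_equiv track=rewrite | github.com/bentang18/spatialconv_neural_speech_decoding | src/speech_decoding/evaluation/grouped_cv.py | validate_fold_coverage
-- ===== SOURCE A (Python) =====
-- def validate_fold_coverage(
--     labels: list[list[int]],
--     train_indices: list[int],
--     n_phonemes: int = 9,
-- ) -> bool:
--     """Check that training set contains all phonemes in all 3 positions.
--
--     Only enforces coverage for phonemes that appear in more than one
--     token at a given position.  Singleton tokens (only one token in the
--     whole dataset carries a particular phoneme at a particular position)
--     cannot be required in training without data leakage — if that token
--     lands in validation, coverage is lost regardless of the assignment.
--     This mirrors real-data constraints where 52 PS tokens give each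
--     phoneme/position pair many repetitions across distinct tokens.
--     """
--     n_positions = max(len(l) for l in labels) if labels else 3
--
--     # For each (position, phoneme), collect the set of distinct tokens
--     # that carry it.  A pair is "enforceable" only when it appears in
--     # ≥2 distinct tokens, so at least one can always remain in training
--     # regardless of which token ends up in the validation fold.
--     token_set_pos_phon: list[dict[int, set]] = [{} for _ in range(n_positions)]
--     for label in labels:
--         key = tuple(label)
--         for pos, phon in enumerate(label):
--             if phon not in token_set_pos_phon[pos]:
--                 token_set_pos_phon[pos][phon] = set()
--             token_set_pos_phon[pos][phon].add(key)
--
--     # Enforceable: phoneme appears in ≥2 distinct tokens at that position.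
--     enforceable: list[set[int]] = [
--         {ph for ph, toks in token_set_pos_phon[pos].items() if len(toks) >= 2}
--         for pos in range(n_positions)
--     ]
--
--     # Check training coverage only for enforceable phoneme/position pairs.
--     train_coverage = [set() for _ in range(n_positions)]
--     for idx in train_indices:
--         for pos, phon in enumerate(labels[idx]):
--             train_coverage[pos].add(phon)
--
--     return all(
--         enforceable[pos] <= train_coverage[pos]
--         for pos in range(n_positions)
--     )
-- ===== SOURCE B (Python) =====
-- def validate_fold_coverage(
--     labels: list[list[int]],
--     train_indices: list[int],
--     n_phonemes: int = 9,
-- ) -> bool: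
--     """Sort-then-scan: a phoneme is enforceable at a position iff the sorted
--     column of distinct-token values has an adjacent duplicate there; return
--     False early on the first enforceable pair not covered by training."""
--     n_positions = max(len(l) for l in labels) if labels else 3
--
--     covered = set()
--     for idx in train_indices:
--         for pos, phon in enumerate(labels[idx]):
--             covered.add((pos, phon))
--
--     distinct = list(dict.fromkeys(tuple(l) for l in labels))
--     for pos in range(n_positions):
--         column = sorted(t[pos] for t in distinct if len(t) > pos)
--         for a, b in zip(column, column[1:]):
--             if a == b and (pos, a) not in covered:
--                 return False
--     return True
-- ===== Notes on version B (the rewrite author's own statement) =====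
-- stated objective: alternative
-- what changed: Enforceability is detected by sorting each position's column of distinct-token values and scanning for adjacent duplicates (sort-then-scan with early return on the first uncovered duplicate), instead of A's per-(position,phoneme) dict of token-sets followed by a subset test.
import Mathlib
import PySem

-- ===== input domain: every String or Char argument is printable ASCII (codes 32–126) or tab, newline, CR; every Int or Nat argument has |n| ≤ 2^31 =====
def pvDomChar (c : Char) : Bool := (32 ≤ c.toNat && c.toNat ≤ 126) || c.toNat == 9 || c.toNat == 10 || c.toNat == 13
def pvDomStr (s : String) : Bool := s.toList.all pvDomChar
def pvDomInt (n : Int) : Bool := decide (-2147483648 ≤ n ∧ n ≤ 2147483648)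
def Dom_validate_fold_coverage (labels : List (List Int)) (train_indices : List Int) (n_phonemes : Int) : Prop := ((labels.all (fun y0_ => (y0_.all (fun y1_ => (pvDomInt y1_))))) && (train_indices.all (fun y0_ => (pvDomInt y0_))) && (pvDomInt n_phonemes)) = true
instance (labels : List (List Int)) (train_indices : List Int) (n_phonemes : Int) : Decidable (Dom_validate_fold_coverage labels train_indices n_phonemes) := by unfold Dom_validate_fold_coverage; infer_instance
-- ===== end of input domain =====

-- B detects an enforceable (position, phoneme) pair by sorting the column of distinct-token values
-- and scanning for adjacent duplicates (early return on the first uncovered one), instead of A's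
-- per-(position,phoneme) dict of token-sets plus subset test — an alternative algorithm, not claimed faster.

-- ===== PORT A =====
-- max(len(l) for l in labels) if labels else 3
def pvNPos (labels : List (List Int)) : Nat :=
  if labels = [] then 3
  else ((PySem.List.max? (labels.map (fun l => l.length)) (fun x => x)).getD 0)

-- 'if phon not in d: d[phon] = set(); d[phon].add(key)' is exactly d.modify phon ∅ (·.add key)
def pvStepA (label : List Int) (tbl : List (PySem.Dict Int (PySem.Set (List Int)))) :
    List (PySem.Dict Int (PySem.Set (List Int))) :=
  (PySem.List.enumerate label 0).foldl
    (fun tbl pp =>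
      PySem.List.pySetD tbl pp.1
        ((PySem.List.pyGetD tbl pp.1 PySem.Dict.empty).modify pp.2 PySem.Set.empty
          (fun s => PySem.Set.add s label)))
    tbl

def pvStepCov (label : List Int) (cov : List (PySem.Set Int)) : List (PySem.Set Int) :=
  (PySem.List.enumerate label 0).foldl
    (fun cov pp =>
      PySem.List.pySetD cov pp.1
        (PySem.Set.add (PySem.List.pyGetD cov pp.1 PySem.Set.empty) pp.2))
    cov

def validate_fold_coverage (labels : List (List Int)) (train_indices : List Int)
    (n_phonemes : Int) : Bool :=
  let n_positions := pvNPos labels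
  let tbl := labels.foldl (fun tbl label => pvStepA label tbl)
      (List.replicate n_positions PySem.Dict.empty)
  let enforceable : List (PySem.Set Int) :=
    (List.range n_positions).map (fun pos =>
      PySem.Set.ofList
        ((((PySem.List.pyGetD tbl (((pos : Nat)) : Int) PySem.Dict.empty).items.filter
            (fun kv => 2 ≤ kv.2.length)).map (fun kv => kv.1))))
  let cov := train_indices.foldl
      (fun cov idx => pvStepCov (PySem.List.pyGetD labels idx []) cov)
      (List.replicate n_positions PySem.Set.empty)
  (List.range n_positions).all (fun pos =>
    PySem.Set.issubset (PySem.List.pyGetD enforceable (((pos : Nat)) : Int) PySem.Set.empty)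
      (PySem.List.pyGetD cov (((pos : Nat)) : Int) PySem.Set.empty))

-- ===== PORT B =====
-- max(len(l) for l in labels) if labels else 3 (B's own copy of the shared source line)
def pvNPosB (labels : List (List Int)) : Nat :=
  if labels = [] then 3
  else ((PySem.List.max? (labels.map (fun l => l.length)) (fun x => x)).getD 0)

-- column[1:] on a list is exactly List.tail (drop 1); zip(column, column[1:]) = column.zip column.tail;
-- the early 'return False' inner/outer loops are the short-circuiting '.all' of the negated condition.
def validate_fold_coverage_alt (labels : List (List Int)) (train_indices : List Int)
    (n_phonemes : Int) : Bool :=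
  let n_positions := pvNPosB labels
  let covered : PySem.Set (Int × Int) := train_indices.foldl
      (fun cov idx =>
        (PySem.List.enumerate (PySem.List.pyGetD labels idx []) 0).foldl
          (fun cov pp => PySem.Set.add cov pp) cov)
      PySem.Set.empty
  let distinct := PySem.List.dedup labels
  (List.range n_positions).all (fun pos =>
    let column := PySem.List.sorted
      ((distinct.filter (fun t => decide (pos < t.length))).map (fun t => t.getD pos 0))
      (fun x => x) false
    (column.zip column.tail).all (fun ab =>
      !(ab.1 == ab.2 && decide (¬ ((((pos : Nat)) : Int), ab.1) ∈ covered))))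

-- ===== PRECONDITION & SPEC =====
-- Pre_ excludes exactly the train indices on which labels[idx] raises IndexError in A (and in B).
def Pre_validate_fold_coverage (labels : List (List Int)) (train_indices : List Int)
    (n_phonemes : Int) : Prop :=
  ∀ idx ∈ train_indices, PySem.Raise.InRange labels.length idx

instance (labels : List (List Int)) (train_indices : List Int) (n_phonemes : Int) :
    Decidable (Pre_validate_fold_coverage labels train_indices n_phonemes) := by
  unfold Pre_validate_fold_coverage; infer_instance

def pvWitness_validate_fold_coverage : List (List Int) × List Int × Int :=
  ([[1, 2], [1, 3], [2, 2]], [0, 2], 9)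

def Spec_validate_fold_coverage (labels : List (List Int)) (train_indices : List Int)
    (n_phonemes : Int) (out : Bool) : Prop :=
  out = validate_fold_coverage_alt labels train_indices n_phonemes

instance (labels : List (List Int)) (train_indices : List Int) (n_phonemes : Int) (out : Bool) :
    Decidable (Spec_validate_fold_coverage labels train_indices n_phonemes out) := by
  unfold Spec_validate_fold_coverage; infer_instance

-- ===== CLAIM (what is proved, stated in full; the proofs are below) =====
def Claim_equal_validate_fold_coverage : Prop := ∀ (labels : List (List Int)) (train_indices : List Int) (n_phonemes : Int), Dom_validate_fold_coverage labels train_indices n_phonemes → Pre_validate_fold_coverage labels train_indices n_phonemes → Spec_validate_fold_coverage labels train_indices n_phonemes (validate_fold_coverage labels train_indices n_phonemes)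

-- ===== LEMMAS AND PROOFS =====

-- generic per-position state-list update, the shape shared by pvStepA and pvStepCov
def pvUpd {σ : Type} (dflt : σ) (g : Int → σ → σ) (label : List Int) (s : Int) (ts : List σ) :
    List σ :=
  (PySem.List.enumerate label s).foldl
    (fun ts pp => PySem.List.pySetD ts pp.1 (g pp.2 (PySem.List.pyGetD ts pp.1 dflt))) ts

-- the tokens (distinct or not) carrying phoneme ph at position pos
def pvSel (labels : List (List Int)) (pos : Nat) (ph : Int) : List (List Int) :=
  labels.filter (fun l => decide (pos < l.length) && (l.getD pos 0 == ph))

-- "(pos, ph) is covered by some training token"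
def pvCov (labels : List (List Int)) (ti : List Int) (pos : Nat) (ph : Int) : Prop :=
  ∃ idx ∈ ti, pos < (PySem.List.pyGetD labels idx []).length ∧
    (PySem.List.pyGetD labels idx []).getD pos 0 = ph

lemma pvUpd_nil {σ : Type} (dflt : σ) (g : Int → σ → σ) (s : Int) (ts : List σ) :
    pvUpd dflt g [] s ts = ts := rfl

lemma pvUpd_cons {σ : Type} (dflt : σ) (g : Int → σ → σ) (x : Int) (xs : List Int) (s : Int)
    (ts : List σ) :
    pvUpd dflt g (x :: xs) s ts =
      pvUpd dflt g xs (s + 1)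
        (PySem.List.pySetD ts s (g x (PySem.List.pyGetD ts s dflt))) := by
  simp [pvUpd, PySem.List.enumerate_cons]

lemma pySetD_length {α : Type} (xs : List α) (i : Int) (v : α) :
    (PySem.List.pySetD xs i v).length = xs.length := by
  unfold PySem.List.pySetD PySem.List.pySet?
  rcases PySem.List.pyIdx? xs.length i with _ | k
  · simp [Option.getD]
  · simp

lemma pvUpd_length {σ : Type} (dflt : σ) (g : Int → σ → σ) (label : List Int) (s : Int)
    (ts : List σ) : (pvUpd dflt g label s ts).length = ts.length := by
  induction label generalizing s ts with
  | nil => rfl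
  | cons x xs ih => rw [pvUpd_cons, ih, pySetD_length]

lemma pvUpd_getD {σ : Type} (dflt : σ) (g : Int → σ → σ) (label : List Int) (n : Nat)
    (ts : List σ) (h : n + label.length ≤ ts.length) (pos : Nat) (hpos : pos < ts.length) :
    (pvUpd dflt g label (n : Int) ts).getD pos dflt =
      if n ≤ pos ∧ pos < n + label.length then g (label.getD (pos - n) 0) (ts.getD pos dflt)
      else ts.getD pos dflt := by
  induction label generalizing n ts with
  | nil =>
    rw [pvUpd_nil, if_neg (by simp only [List.length_nil]; omega)]
  | cons x xs ih =>
    have hn : n < ts.length := by simp at h; omega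
    rw [pvUpd_cons]
    have hset : PySem.List.pySetD ts (n : Int) (g x (PySem.List.pyGetD ts (n : Int) dflt)) =
        ts.set n (g x (ts.getD n dflt)) := by
      rw [PySem.List.pyGetD_natCast]
      unfold PySem.List.pySetD
      rw [PySem.List.pySet?_natCast _ _ _ hn]
      rfl
    rw [hset, show ((n : Int) + 1) = ((n + 1 : Nat) : Int) by push_cast; ring]
    rw [ih (n + 1) _ (by rw [List.length_set]; simp only [List.length_cons] at h; omega)
      (by rw [List.length_set]; exact hpos)]
    simp only [List.getD_eq_getElem?_getD, List.getElem?_set]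
    by_cases hps : pos = n
    · subst hps
      rw [if_neg (by omega), if_pos rfl, if_pos (by omega)]
      simp [List.getElem?_eq_getElem hn]
    · rw [if_neg (Ne.symm hps)]
      by_cases hrange : n + 1 ≤ pos ∧ pos < n + 1 + xs.length
      · rw [if_pos hrange, if_pos (by (try simp only [List.length_cons]); omega)]
        have : pos - n = (pos - (n + 1)) + 1 := by omega
        rw [this]
        simp
      · rw [if_neg hrange, if_neg (by (try simp only [List.length_cons]); omega)]

lemma pvFold_getD {σ : Type} (dflt : σ) (g : List Int → Int → σ → σ) (L : List (List Int))
    (N pos : Nat) (hpos : pos < N) (hlen : ∀ l ∈ L, l.length ≤ N) (ts : List σ)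
    (hts : ts.length = N) :
    (L.foldl (fun ts l => pvUpd dflt (g l) l 0 ts) ts).getD pos dflt =
      L.foldl (fun s l => if pos < l.length then g l (l.getD pos 0) s else s)
        (ts.getD pos dflt) := by
  induction L generalizing ts with
  | nil => rfl
  | cons l L ih =>
    simp only [List.foldl_cons]
    rw [ih (fun x hx => hlen x (List.mem_cons_of_mem _ hx)) _
      (by rw [pvUpd_length]; exact hts)]
    have h0 := pvUpd_getD dflt (g l) l 0 ts
      (by rw [hts]; simpa using hlen l (List.mem_cons_self))
      pos (by rw [hts]; exact hpos)
    simp only [Nat.cast_zero, Nat.zero_le, true_and, Nat.zero_add, Nat.sub_zero] at h0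
    rw [h0]

lemma dict_fold_getD {ν : Type} (key : List Int → Int) (d0 : ν) (f : List Int → ν → ν)
    (L : List (List Int)) (d : PySem.Dict Int ν) (ph : Int) :
    (L.foldl (fun d l => d.modify (key l) d0 (f l)) d).getD ph d0 =
      (L.filter (fun l => key l == ph)).foldl (fun v l => f l v) (d.getD ph d0) := by
  induction L generalizing d with
  | nil => rfl
  | cons l L ih =>
    simp only [List.foldl_cons, List.filter_cons]
    rw [ih]
    by_cases hk : key l = ph
    · rw [if_pos (by simpa using hk)]
      simp only [List.foldl_cons]
      rw [PySem.Dict.getD_modify, if_pos hk.symm, hk]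
    · rw [if_neg (by simpa using hk)]
      rw [PySem.Dict.getD_modify, if_neg (Ne.symm hk)]

lemma set_ofList_filter {α : Type} [BEq α] [LawfulBEq α] (p : α → Bool) (xs : List α) :
    PySem.Set.ofList (xs.filter p) = (PySem.Set.ofList xs).filter p := by
  induction xs with
  | nil => rfl
  | cons x xs ih =>
    by_cases hx : p x = true
    · rw [List.filter_cons_of_pos hx, PySem.Set.ofList_cons, PySem.Set.ofList_cons, ih,
        List.filter_cons_of_pos hx]
      congr 1
      simp only [PySem.Set.discard, List.filter_filter]
      congr 1
      funext a
      rw [Bool.and_comm]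
    · rw [List.filter_cons_of_neg (by simpa using hx), PySem.Set.ofList_cons, ih,
        List.filter_cons_of_neg (by simpa using hx)]
      simp only [PySem.Set.discard, List.filter_filter]
      congr 1
      funext a
      by_cases ha : (a == x) = true
      · have hax : a = x := by simpa using ha
        subst hax
        simp [Bool.eq_false_iff.mpr hx]
      · simp [ha]

lemma pvNPos_ge (labels : List (List Int)) : ∀ l ∈ labels, l.length ≤ pvNPos labels := by
  intro l hl
  unfold pvNPos
  rw [if_neg (by rintro rfl; cases hl)]
  obtain ⟨m, hm⟩ : ∃ m, PySem.List.max? (labels.map (fun l => l.length)) (fun x => x) = some m := by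
    rcases h : PySem.List.max? (labels.map (fun l => l.length)) (fun x => x) with _ | m
    · rw [PySem.List.max?_eq_none_iff] at h
      simp at h
      subst h; cases hl
    · exact ⟨m, h⟩
  rw [hm]
  exact PySem.List.max?_isMax hm _ (List.mem_map_of_mem hl)

-- the per-position dictionary A accumulates, as a plain dict fold
lemma tblA_dict (labels : List (List Int)) (pos : Nat) (hpos : pos < pvNPos labels) :
    (labels.foldl (fun tbl label => pvStepA label tbl)
        (List.replicate (pvNPos labels) PySem.Dict.empty)).getD pos PySem.Dict.empty =
      (labels.filter (fun x => decide (pos < x.length))).foldl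
        (fun d l => d.modify (l.getD pos 0) PySem.Set.empty (fun s => PySem.Set.add s l))
        PySem.Dict.empty := by
  have hstep : (fun (tbl : List (PySem.Dict Int (PySem.Set (List Int)))) label =>
      pvStepA label tbl) = fun tbl label =>
        pvUpd PySem.Dict.empty
          (fun ph d => d.modify ph PySem.Set.empty (fun s => PySem.Set.add s label)) label 0 tbl := rfl
  rw [hstep, pvFold_getD _ _ _ _ pos hpos (pvNPos_ge labels) _ (List.length_replicate)]
  rw [List.getD_replicate _ hpos]
  exact PySem.List.foldl_ite_eq_foldl_filter (fun l : List Int => pos < l.length)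
    (fun (d : PySem.Dict Int (PySem.Set (List Int))) l =>
      d.modify (l.getD pos 0) PySem.Set.empty (fun s => PySem.Set.add s l)) labels
      PySem.Dict.empty

-- its value at a phoneme: the distinct tokens carrying ph at pos
lemma tblA_getD (labels : List (List Int)) (pos : Nat) (ph : Int) (hpos : pos < pvNPos labels) :
    ((labels.foldl (fun tbl label => pvStepA label tbl)
        (List.replicate (pvNPos labels) PySem.Dict.empty)).getD pos PySem.Dict.empty).getD ph
        PySem.Set.empty = PySem.Set.ofList (pvSel labels pos ph) := by
  rw [tblA_dict labels pos hpos]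
  rw [dict_fold_getD (fun l => l.getD pos 0) PySem.Set.empty
    (fun l s => PySem.Set.add s l)]
  rw [PySem.Dict.getD_empty, List.filter_filter]
  rw [PySem.Set.ofList_eq_foldl]
  unfold pvSel
  congr 1
  apply List.filter_congr
  intro a _
  rw [Bool.and_comm]

lemma covA_mem (labels : List (List Int)) (ti : List Int) (pos : Nat) (ph : Int)
    (hpos : pos < pvNPos labels) (hpre : ∀ idx ∈ ti, PySem.Raise.InRange labels.length idx) :
    (ph ∈ (ti.foldl (fun cov idx => pvStepCov (PySem.List.pyGetD labels idx []) cov)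
        (List.replicate (pvNPos labels) PySem.Set.empty)).getD pos PySem.Set.empty) ↔
      pvCov labels ti pos ph := by
  have hmap : ti.foldl (fun cov idx => pvStepCov (PySem.List.pyGetD labels idx []) cov)
      (List.replicate (pvNPos labels) PySem.Set.empty) =
      (ti.map (fun idx => PySem.List.pyGetD labels idx [])).foldl
        (fun cov label => pvStepCov label cov)
        (List.replicate (pvNPos labels) PySem.Set.empty) := by
    rw [List.foldl_map]
  rw [hmap]
  have hstep : (fun (cov : List (PySem.Set Int)) label => pvStepCov label cov) =
      fun cov label =>
        pvUpd PySem.Set.empty (fun phon s => PySem.Set.add s phon) label 0 cov := rfl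
  rw [hstep, pvFold_getD _ _ _ _ pos hpos ?hlen _ (List.length_replicate)]
  case hlen =>
    intro l hl
    rw [List.mem_map] at hl
    obtain ⟨idx, hidx, rfl⟩ := hl
    exact pvNPos_ge labels _ (PySem.List.pyGetD_mem _ _ (hpre idx hidx))
  rw [List.getD_replicate _ hpos]
  have hfi := PySem.List.foldl_ite_eq_foldl_filter (fun l : List Int => pos < l.length)
    (fun (s : PySem.Set Int) l => PySem.Set.add s (l.getD pos 0))
    (List.map (fun idx => PySem.List.pyGetD labels idx []) ti) PySem.Set.empty
  rw [show (List.foldl (fun s l => if pos < l.length then s.add (l.getD pos 0) else s)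
      PySem.Set.empty (List.map (fun idx => PySem.List.pyGetD labels idx []) ti)) = _ from hfi]
  have hmem := PySem.Set.mem_foldl_add
    (List.filter (fun x => decide (pos < x.length))
      (List.map (fun idx => PySem.List.pyGetD labels idx []) ti))
    (fun l : List Int => l.getD pos 0) PySem.Set.empty ph
  rw [hmem]
  unfold pvCov
  simp only [List.mem_filter, List.mem_map, PySem.Set.empty]
  constructor
  · rintro (h | ⟨l, ⟨⟨idx, hidx, rfl⟩, hlen⟩, rfl⟩)
    · cases h
    · exact ⟨idx, hidx, by simpa using hlen, rfl⟩
  · rintro ⟨idx, hidx, hlen, rfl⟩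
    exact Or.inr ⟨_, ⟨⟨idx, hidx, rfl⟩, by simpa using hlen⟩, rfl⟩

lemma tblA_keys_nodup (labels : List (List Int)) (pos : Nat) :
    ((labels.filter (fun x => decide (pos < x.length))).foldl
      (fun (d : PySem.Dict Int (PySem.Set (List Int))) (l : List Int) =>
        d.modify (l.getD pos 0) PySem.Set.empty (fun s => PySem.Set.add s l))
      PySem.Dict.empty).keys.Nodup := by
  exact PySem.Dict.nodup_keys_foldl_modify_key _ (fun l : List Int => l.getD pos 0) _
    (fun _ l s => PySem.Set.add s l) _ (by simp [PySem.Dict.keys, PySem.Dict.empty])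

lemma mem_enfSet (d : PySem.Dict Int (PySem.Set (List Int))) (hnd : d.keys.Nodup) (ph : Int) :
    ph ∈ PySem.Set.ofList ((d.items.filter (fun kv => 2 ≤ kv.2.length)).map (fun kv => kv.1)) ↔
      2 ≤ (d.getD ph PySem.Set.empty).length := by
  rw [PySem.Set.mem_ofList, List.mem_map]
  constructor
  · rintro ⟨kv, hkv, rfl⟩
    rw [List.mem_filter] at hkv
    obtain ⟨hmem, hlen⟩ := hkv
    rw [show d.getD kv.1 PySem.Set.empty = kv.2 from
      PySem.Dict.getD_of_mem_items d (by simpa using hmem) hnd _]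
    simpa using hlen
  · intro hlen
    rcases h : d.get? ph with _ | v
    · rw [PySem.Dict.getD_of_get?_eq_none d _ h] at hlen
      simp [PySem.Set.empty] at hlen
    · have hv : d.getD ph PySem.Set.empty = v := PySem.Dict.getD_of_get?_eq_some d _ h
      refine ⟨(ph, v), ?_, rfl⟩
      rw [List.mem_filter]
      exact ⟨PySem.Dict.mem_items_of_get?_eq_some d h, by rw [hv] at hlen; simpa using hlen⟩

lemma A_iff (labels : List (List Int)) (ti : List Int) (n : Int)
    (hpre : ∀ idx ∈ ti, PySem.Raise.InRange labels.length idx) :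
    validate_fold_coverage labels ti n = true ↔
      ∀ pos < pvNPos labels, ∀ ph : Int,
        2 ≤ (PySem.Set.ofList (pvSel labels pos ph)).length → pvCov labels ti pos ph := by
  simp only [validate_fold_coverage, List.all_eq_true, List.mem_range]
  refine forall_congr' (fun pos => ?_)
  refine imp_congr_right (fun hpos => ?_)
  rw [PySem.List.pyGetD_natCast, PySem.List.pyGetD_natCast]
  rw [PySem.List.getD_map_range _ _ _ _ hpos]
  rw [PySem.Set.issubset_iff]
  have hnd : ((labels.foldl (fun tbl label => pvStepA label tbl)
      (List.replicate (pvNPos labels) PySem.Dict.empty)).getD pos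
      PySem.Dict.empty).keys.Nodup := by
    rw [tblA_dict labels pos hpos]; exact tblA_keys_nodup labels pos
  constructor
  · intro hsub ph hcnt
    rw [← covA_mem labels ti pos ph hpos hpre]
    apply hsub
    rw [PySem.List.pyGetD_natCast, mem_enfSet _ hnd, tblA_getD labels pos ph hpos]
    exact hcnt
  · intro h ph hph
    rw [PySem.List.pyGetD_natCast, mem_enfSet _ hnd, tblA_getD labels pos ph hpos] at hph
    rw [covA_mem labels ti pos ph hpos hpre]
    exact h ph hph

lemma covB_mem (labels : List (List Int)) (ti : List Int) (y : Int × Int)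
    (cov : PySem.Set (Int × Int)) :
    y ∈ ti.foldl (fun cov idx =>
        (PySem.List.enumerate (PySem.List.pyGetD labels idx []) 0).foldl
          (fun cov pp => PySem.Set.add cov pp) cov) cov ↔
      y ∈ cov ∨ ∃ idx ∈ ti, y ∈ PySem.List.enumerate (PySem.List.pyGetD labels idx []) 0 := by
  induction ti generalizing cov with
  | nil => simp
  | cons i ti ih =>
    simp only [List.foldl_cons]
    rw [ih]
    have hin := PySem.Set.mem_foldl_add
      (PySem.List.enumerate (PySem.List.pyGetD labels i []) 0)
      (fun pp : Int × Int => pp) cov y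
    rw [hin]
    simp only [List.mem_cons]
    constructor
    · rintro ((hy | ⟨b, hb, rfl⟩) | ⟨idx, hidx, hy⟩)
      · exact Or.inl hy
      · exact Or.inr ⟨i, Or.inl rfl, hb⟩
      · exact Or.inr ⟨idx, Or.inr hidx, hy⟩
    · rintro (hy | ⟨idx, (rfl | hidx), hy⟩)
      · exact Or.inl (Or.inl hy)
      · exact Or.inl (Or.inr ⟨y, hy, rfl⟩)
      · exact Or.inr ⟨idx, hidx, hy⟩

lemma enum_pair_mem (l : List Int) (pos : Nat) (ph : Int) :
    ((pos : Int), ph) ∈ PySem.List.enumerate l 0 ↔ pos < l.length ∧ l.getD pos 0 = ph := by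
  rw [PySem.List.mem_enumerate_iff]
  constructor
  · rintro ⟨k, hk, heq⟩
    rw [Prod.mk.injEq] at heq
    obtain ⟨h1, h2⟩ := heq
    have hpk : pos = k := by omega
    subst hpk
    exact ⟨hk, by rw [List.getD_eq_getElem _ _ hk, h2]⟩
  · rintro ⟨hlt, hval⟩
    refine ⟨pos, hlt, ?_⟩
    rw [Prod.mk.injEq]
    exact ⟨by omega, by rw [← hval, List.getD_eq_getElem _ _ hlt]⟩

lemma column_count (labels : List (List Int)) (pos : Nat) (ph : Int) :
    (((PySem.Set.ofList labels).filter (fun t => decide (pos < t.length))).map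
      (fun t => t.getD pos 0)).count ph =
      (PySem.Set.ofList (pvSel labels pos ph)).length := by
  rw [List.count_eq_countP, List.countP_map, List.countP_filter]
  rw [List.countP_eq_length_filter]
  rw [show pvSel labels pos ph =
      labels.filter (fun a => ((fun x => x == ph) ∘ fun t => t.getD pos 0) a &&
        decide (pos < a.length)) from ?_]
  · rw [set_ofList_filter]
  · unfold pvSel
    apply List.filter_congr
    intro a _
    simp [Bool.and_comm]

-- in a ≤-sorted list the pair (ph, ph) appears adjacently iff ph occurs at least twice
lemma adj_dup_count : ∀ (l : List Int), l.Pairwise (fun a b => a ≤ b) → ∀ ph : Int,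
    ((ph, ph) ∈ l.zip l.tail ↔ 2 ≤ l.count ph) := by
  intro l
  induction l with
  | nil => intro _ ph; simp
  | cons a l ih =>
    intro hs ph
    rw [List.pairwise_cons] at hs
    obtain ⟨ha, hl⟩ := hs
    cases l with
    | nil =>
      have hle : List.count ph [a] ≤ 1 := le_trans (List.count_le_length) (by simp)
      simp only [List.tail_cons, List.zip_nil_right, List.not_mem_nil, false_iff]
      omega
    | cons b t =>
      have hih := ih hl ph
      have hsplit : (a :: b :: t).count ph = (b :: t).count ph + if a = ph then 1 else 0 := by
        simp [List.count_cons]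
      simp only [List.tail_cons] at hih ⊢
      rw [List.zip_cons_cons]
      simp only [List.mem_cons]
      constructor
      · rintro (heq | hmem)
        · rw [Prod.mk.injEq] at heq
          obtain ⟨h1, h2⟩ := heq
          rw [hsplit, if_pos h1.symm]
          have hb1 : 1 ≤ (b :: t).count ph := by
            rw [show (b :: t).count ph = t.count ph + if b = ph then 1 else 0 by
              simp [List.count_cons], if_pos h2.symm]
            omega
          omega
        · have := hih.mp hmem
          rw [hsplit]
          omega
      · intro hcnt
        rw [hsplit] at hcnt
        by_cases hap : a = ph
        · have hbp : b = ph := by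
            have hab : a ≤ b := ha b (List.mem_cons_self)
            have h1 : 1 ≤ (b :: t).count ph := by
              rw [if_pos hap] at hcnt; omega
            have hphm : ph ∈ b :: t := List.count_pos_iff.mp (by omega)
            rcases List.mem_cons.mp hphm with rfl | hpt
            · rfl
            · have hb : b ≤ ph := by
                rw [List.pairwise_cons] at hl
                exact hl.1 ph hpt
              omega
          exact Or.inl (by rw [Prod.mk.injEq]; exact ⟨hap.symm, hbp.symm⟩)
        · refine Or.inr (hih.mpr ?_)
          rw [if_neg hap] at hcnt
          omega

lemma B_iff (labels : List (List Int)) (ti : List Int) (n : Int) :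
    validate_fold_coverage_alt labels ti n = true ↔
      ∀ pos < pvNPos labels, ∀ ph : Int,
        2 ≤ (PySem.Set.ofList (pvSel labels pos ph)).length → pvCov labels ti pos ph := by
  simp only [validate_fold_coverage_alt, List.all_eq_true, List.mem_range,
    PySem.List.dedup_eq_ofList, PySem.Set.empty]
  rw [show pvNPosB labels = pvNPos labels from rfl]
  refine forall_congr' (fun pos => imp_congr_right (fun hpos => ?_))
  set colraw := ((PySem.Set.ofList labels).filter (fun t => decide (pos < t.length))).map
    (fun t => t.getD pos 0) with hcolraw
  set column := PySem.List.sorted colraw (fun x => x) false with hcol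
  have hcount : ∀ ph : Int, column.count ph = colraw.count ph := fun ph =>
    (PySem.List.sorted_perm colraw (fun x => x) false).count_eq ph
  have hpw : column.Pairwise (fun a b : Int => a ≤ b) :=
    PySem.List.sorted_pairwise colraw (fun x => x)
  constructor
  · intro hall ph hcnt
    have hc2 : 2 ≤ column.count ph := by
      rw [hcount, hcolraw, column_count]; exact hcnt
    have hz := (adj_dup_count column hpw ph).mpr hc2
    have hp := hall _ hz
    simp only [Bool.not_eq_eq_eq_not, Bool.not_true, Bool.and_eq_false_iff, beq_iff_eq,
      decide_eq_false_iff_not, not_not] at hp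
    rcases hp with hp | hp
    · simp at hp
    · rw [covB_mem] at hp
      rcases hp with hp | ⟨idx, hidx, hp⟩
      · simp at hp
      · rw [enum_pair_mem] at hp
        exact ⟨idx, hidx, hp.1, hp.2⟩
  · intro h ab hab
    obtain ⟨x, y⟩ := ab
    by_cases hxy : x = y
    · subst hxy
      have hc2 : 2 ≤ column.count x := (adj_dup_count column hpw x).mp hab
      rw [hcount, hcolraw, column_count] at hc2
      obtain ⟨idx, hidx, hlen, hval⟩ := h x hc2
      have hmem : (((pos : Nat) : Int), x) ∈ ti.foldl
          (fun cov idx => (PySem.List.enumerate (PySem.List.pyGetD labels idx []) 0).foldl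
            (fun cov pp => PySem.Set.add cov pp) cov) ([] : PySem.Set (Int × Int)) := by
        rw [covB_mem]
        exact Or.inr ⟨idx, hidx, (enum_pair_mem _ _ _).mpr ⟨hlen, hval⟩⟩
      simp [hmem]
    · simp [hxy]

-- ===== VERDICT (by name: the statement is the Claim_ definition above) =====
theorem validate_fold_coverage_spec : Claim_equal_validate_fold_coverage := by
  unfold Claim_equal_validate_fold_coverage
  intro labels ti n _ hpre
  unfold Spec_validate_fold_coverage
  have hpre' : ∀ idx ∈ ti, PySem.Raise.InRange labels.length idx := hpre
  have hA := A_iff labels ti n hpre'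
  have hB := B_iff labels ti n
  by_cases hP : ∀ pos < pvNPos labels, ∀ ph : Int,
      2 ≤ (PySem.Set.ofList (pvSel labels pos ph)).length → pvCov labels ti pos ph
  · rw [hA.mpr hP, hB.mpr hP]
  · have h1 : validate_fold_coverage labels ti n = false := by
      cases h : validate_fold_coverage labels ti n
      · rfl
      · exact absurd (hA.mp h) hP
    have h2 : validate_fold_coverage_alt labels ti n = false := by
      cases h : validate_fold_coverage_alt labels ti n
      · rfl
      · exact absurd (hB.mp h) hP
    rw [h1, h2]
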